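-- pv_equiv track=rewrite | github.com/dleemiller/CnakeCharmer | cnake_data/unpaired/retina_kernel_ops.py | pad_colored
-- ===== SOURCE A (Python) =====
-- def pad_colored(img, padding):
--     """Zero-pad a 3D RGB image."""
--     h = len(img)
--     w = len(img[0]) if h else 0
--     c = len(img[0][0]) if h and w else 0
--     out_h = h + 2 * padding
--     out_w = w + 2 * padding
--     out = [[[0 for _ in range(c)] for _ in range(out_w)] for _ in range(out_h)]
--
--     for i in range(h):
--         for j in range(w):
--             for k in range(c):
--                 out[i + padding][j + padding][k] = int(img[i][j][k])
--     return out
-- ===== SOURCE B (Python) =====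
-- def pad_colored(img, padding):
--     """Zero-pad a 3D RGB image, computed as a pure function of output coordinates."""
--     h = len(img)
--     w = len(img[0]) if h else 0
--     c = len(img[0][0]) if h and w else 0
--     return [
--         [
--             [int(img[oi - padding][oj - padding][k]) for k in range(c)]
--             if padding <= oi < padding + h and padding <= oj < padding + w
--             else [0 for _ in range(c)]
--             for oj in range(w + 2 * padding)
--         ]
--         for oi in range(h + 2 * padding)
--     ]
-- ===== Notes on version B (the rewrite author's own statement) =====
-- stated objective: alternative
-- what changed: B computes each output pixel as a pure function of its output coordinates (a double comprehension choosing a converted input pixel inside the image window, a fresh zero pixel outside), instead of preallocating a zero grid and overwriting it with a triple nested index-assignment loop.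
import Mathlib
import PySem

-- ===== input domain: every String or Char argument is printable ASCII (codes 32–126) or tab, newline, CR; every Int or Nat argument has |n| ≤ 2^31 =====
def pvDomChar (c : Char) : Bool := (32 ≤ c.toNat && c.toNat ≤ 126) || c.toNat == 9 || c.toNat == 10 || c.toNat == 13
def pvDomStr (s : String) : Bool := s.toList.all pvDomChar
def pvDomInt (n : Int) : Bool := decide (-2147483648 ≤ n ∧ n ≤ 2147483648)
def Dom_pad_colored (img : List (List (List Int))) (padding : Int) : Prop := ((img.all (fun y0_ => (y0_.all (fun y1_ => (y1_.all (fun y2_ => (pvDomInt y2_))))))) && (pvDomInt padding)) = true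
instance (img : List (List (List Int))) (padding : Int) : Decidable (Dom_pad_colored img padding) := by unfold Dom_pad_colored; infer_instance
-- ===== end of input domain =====

-- B computes each output pixel as a pure function of its output coordinates instead of
-- preallocating a zero grid and overwriting it with a triple nested index-assignment loop
-- (objective: alternative decomposition, same cost).

-- ===== PORT A =====
-- out[a][b][k] = v is ported as: get row, get pixel, set element, set pixel back, set row back,
-- via PySem.List.pyGetD / pySetD (exact wherever Python does not raise IndexError; out-of-range
-- writes/reads are excluded by Pre_pad_colored).  int(v) on an int is v.
def pad_colored (img : List (List (List Int))) (padding : Int) : List (List (List Int)) :=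
  let h : Int := img.length
  let w : Int := if h ≠ 0 then ((PySem.List.pyGetD img 0 []).length : Int) else 0
  let c : Int := if h ≠ 0 ∧ w ≠ 0 then ((PySem.List.pyGetD (PySem.List.pyGetD img 0 []) 0 []).length : Int) else 0
  let out_h := h + 2 * padding
  let out_w := w + 2 * padding
  let out0 := (PySem.List.pyRange 0 out_h 1).map (fun _ =>
      (PySem.List.pyRange 0 out_w 1).map (fun _ =>
        (PySem.List.pyRange 0 c 1).map (fun _ => (0 : Int))))
  (PySem.List.pyRange 0 h 1).foldl (fun out i =>
    (PySem.List.pyRange 0 w 1).foldl (fun out j =>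
      (PySem.List.pyRange 0 c 1).foldl (fun out k =>
        PySem.List.pySetD out (i + padding)
          (PySem.List.pySetD (PySem.List.pyGetD out (i + padding) []) (j + padding)
            (PySem.List.pySetD
              (PySem.List.pyGetD (PySem.List.pyGetD out (i + padding) []) (j + padding) [])
              k
              (PySem.List.pyGetD (PySem.List.pyGetD (PySem.List.pyGetD img i []) j []) k 0)))) out) out) out0

-- ===== PORT B =====
-- Each output pixel is chosen by its coordinates: a converted input pixel inside the image
-- window, a fresh zero pixel outside.  int(v) on an int is v.
def pad_colored_alt (img : List (List (List Int))) (padding : Int) : List (List (List Int)) :=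
  let h : Int := img.length
  let w : Int := if h ≠ 0 then ((PySem.List.pyGetD img 0 []).length : Int) else 0
  let c : Int := if h ≠ 0 ∧ w ≠ 0 then ((PySem.List.pyGetD (PySem.List.pyGetD img 0 []) 0 []).length : Int) else 0
  (PySem.List.pyRange 0 (h + 2 * padding) 1).map (fun oi =>
    (PySem.List.pyRange 0 (w + 2 * padding) 1).map (fun oj =>
      if 0 ≤ oi - padding ∧ oi - padding < h ∧ 0 ≤ oj - padding ∧ oj - padding < w then
        (PySem.List.pyRange 0 c 1).map (fun k =>
          PySem.List.pyGetD (PySem.List.pyGetD (PySem.List.pyGetD img (oi - padding) []) (oj - padding) []) k 0)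
      else
        (PySem.List.pyRange 0 c 1).map (fun _ => (0 : Int))))

-- ===== PRECONDITION & SPEC =====
-- Pre_ is exactly the set of inputs on which A returns (everywhere else A raises IndexError):
-- either the channel count c = len(img[0][0]) is 0 — then A's assignment body never runs — or
-- padding is non-negative, every row is at least as long as the first row, and every pixel among a
-- row's first len(img[0]) entries is at least as long as img[0][0].
def Pre_pad_colored (img : List (List (List Int))) (padding : Int) : Prop :=
  (PySem.List.pyGetD (PySem.List.pyGetD img 0 []) 0 []).length = 0 ∨
  (0 ≤ padding ∧
   ∀ r ∈ img, (PySem.List.pyGetD img 0 []).length ≤ r.length ∧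
     ∀ px ∈ r.take (PySem.List.pyGetD img 0 []).length,
       (PySem.List.pyGetD (PySem.List.pyGetD img 0 []) 0 []).length ≤ px.length)
instance (img : List (List (List Int))) (padding : Int) : Decidable (Pre_pad_colored img padding) := by
  unfold Pre_pad_colored; infer_instance

def pvWitness_pad_colored : List (List (List Int)) × Int := ([[[1, 2], [3, 4]]], 1)

def Spec_pad_colored (img : List (List (List Int))) (padding : Int) (out : List (List (List Int))) : Prop := out = pad_colored_alt img padding
instance (img : List (List (List Int))) (padding : Int) (out : List (List (List Int))) : Decidable (Spec_pad_colored img padding out) := by unfold Spec_pad_colored; infer_instance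

-- ===== CLAIM (what is proved, stated in full; the proofs are below) =====
def Claim_equal_pad_colored : Prop := ∀ (img : List (List (List Int))) (padding : Int), Dom_pad_colored img padding → Pre_pad_colored img padding → Spec_pad_colored img padding (pad_colored img padding)

-- ===== LEMMAS AND PROOFS =====

theorem foldl_keep {α β : Type} (a : α) (l : List β) : l.foldl (fun x _ => x) a = a := by
  induction l generalizing a with
  | nil => rfl
  | cons x l ih => exact ih a

def modAt {β : Type} (d : β) (l : List β) (n : ℕ) (f : β → β) : List β :=
  l.set n (f (l.getD n d))

theorem length_modAt {β : Type} (d : β) (l : List β) (n : ℕ) (f : β → β) :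
    (modAt d l n f).length = l.length := by
  simp [modAt]

theorem modAt_modAt_same {β : Type} (d : β) (l : List β) (n : ℕ) (f g : β → β)
    (h : n < l.length) :
    modAt d (modAt d l n f) n g = modAt d l n (fun x => g (f x)) := by
  simp [modAt, List.set_set, List.getD, h]

theorem foldl_modAt_const_idx {β γ : Type} (d : β) (n : ℕ) (f : γ → β → β) :
    ∀ (fs : List γ) (l : List β), n < l.length →
      fs.foldl (fun a k => modAt d a n (f k)) l
        = modAt d l n (fun x => fs.foldl (fun x k => f k x) x) := by
  intro fs
  induction fs with
  | nil => intro l h; simp [modAt, List.getD, List.getElem?_eq_getElem h]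
  | cons x fs ih =>
      intro l h
      simp only [List.foldl_cons]
      rw [ih _ (by simpa [modAt] using h), modAt_modAt_same _ _ _ _ _ h]

theorem foldl_congr_len {β γ : Type} (L : ℕ) :
    ∀ (l : List γ) (f g : List β → γ → List β) (a : List β), a.length = L →
      (∀ x j, x.length = L → j ∈ l → f x j = g x j) →
      (∀ x j, x.length = L → (g x j).length = L) →
      l.foldl f a = l.foldl g a := by
  intro l
  induction l with
  | nil => intros; rfl
  | cons x l ih =>
      intro f g a ha hfg hlen
      simp only [List.foldl_cons]
      rw [hfg a x ha (by simp)]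
      exact ih f g (g a x) (hlen a x ha)
        (fun y j hy hj => hfg y j hy (by simp [hj])) hlen

theorem map_range_getD {α : Type} (xs : List α) (n : ℕ) (d : α) (h : n ≤ xs.length) :
    (List.range n).map (fun k => xs.getD k d) = xs.take n := by
  apply List.ext_getElem
  · simp [Nat.min_eq_left h]
  · intro i h1 h2
    simp at h1
    simp [List.getD, List.getElem?_eq_getElem (lt_of_lt_of_le h1 h)]

theorem foldl_modAt_shift {β : Type} (d : β) (p : ℕ) (F : ℕ → β → β) :
    ∀ (n : ℕ) (acc : List β), n + p ≤ acc.length →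
      (List.range n).foldl (fun a j => modAt d a (j + p) (F j)) acc
        = acc.take p ++ (List.range n).map (fun j => F j (acc.getD (j + p) d)) ++ acc.drop (n + p) := by
  intro n
  induction n with
  | zero => intro acc h; simp [List.take_append_drop]
  | succ n ih =>
      intro acc h
      rw [List.range_succ, List.foldl_append, List.foldl_cons, List.foldl_nil,
        ih acc (by omega)]
      have hlt : n + p < acc.length := by omega
      have hlen1 : (acc.take p).length = p := by simp; omega
      have hmapl : ((List.range n).map (fun j => F j (acc.getD (j + p) d))).length = n := by simp
      have hdrop : acc.drop (n + p) = acc[n+p] :: acc.drop (n + p + 1) :=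
        (List.drop_eq_getElem_cons hlt)
      rw [modAt, List.getD, hdrop]
      rw [List.append_assoc]
      have hpre : ((acc.take p) ++ ((List.range n).map (fun j => F j (acc.getD (j + p) d)))).length = p + n := by
        simp [hlen1]
      rw [← List.append_assoc]
      rw [List.getElem?_append_right (by simp; omega)]
      rw [List.set_append_right _ _ (by simp; omega)]
      simp only [hpre]
      have h1 : n + p - (p + n) = 0 := by omega
      rw [h1]
      simp only [List.getElem?_cons_zero, List.set_cons_zero, Option.getD_some]
      rw [List.map_append]
      simp [List.getD, List.getElem?_eq_getElem hlt]
      congr 1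
      omega

theorem getD_replicate' {α : Type} (a d : α) (m n : ℕ) (h : n < m) :
    (List.replicate m a).getD n d = a := by
  simp [List.getD, h]

theorem natWorld (img : List (List (List Int))) (P W C : ℕ)
    (hW : ∀ r ∈ img, W ≤ r.length)
    (hC : ∀ r ∈ img, ∀ px ∈ r.take W, C ≤ px.length) :
    (List.range img.length).foldl
      (fun out i => (List.range W).foldl
        (fun out j => (List.range C).foldl
          (fun out k => modAt [] out (i + P) (fun row => modAt [] row (j + P)
             (fun px => px.set k (((img.getD i []).getD j []).getD k 0)))) out) out)
      (List.replicate (img.length + 2*P) (List.replicate (W + 2*P) (List.replicate C (0:Int))))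
    = List.replicate P (List.replicate (W + 2*P) (List.replicate C (0:Int)))
      ++ img.map (fun r => List.replicate P (List.replicate C (0:Int))
            ++ (r.take W).map (fun px => px.take C)
            ++ List.replicate P (List.replicate C (0:Int)))
      ++ List.replicate P (List.replicate (W + 2*P) (List.replicate C (0:Int))) := by
  set zpix := List.replicate C (0:Int) with hzpix
  set zrow := List.replicate (W + 2*P) zpix with hzrow
  set h := img.length with hh
  set v : ℕ → ℕ → ℕ → Int := fun i j k => ((img.getD i []).getD j []).getD k 0 with hv
  set G : ℕ → List (List Int) → List (List Int) := fun i row =>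
    (List.range W).foldl (fun row j => (List.range C).foldl
      (fun row k => modAt [] row (j + P) (fun px => px.set k (v i j k))) row) row with hG
  have step1 : (List.range h).foldl
      (fun out i => (List.range W).foldl
        (fun out j => (List.range C).foldl
          (fun out k => modAt [] out (i + P) (fun row => modAt [] row (j + P)
             (fun px => px.set k (v i j k)))) out) out)
      (List.replicate (h + 2*P) zrow)
      = (List.range h).foldl (fun out i => modAt [] out (i + P) (G i))
          (List.replicate (h + 2*P) zrow) := by
    apply foldl_congr_len (h + 2*P)
    · simp
    · intro out i hout hi
      have hiP : i + P < out.length := by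
        rw [hout]; have := List.mem_range.mp hi; omega
      have e0 : (List.range W).foldl
          (fun out j => (List.range C).foldl
            (fun out k => modAt [] out (i + P) (fun row => modAt [] row (j + P)
               (fun px => px.set k (v i j k)))) out) out
          = (List.range W).foldl
            (fun out j => modAt [] out (i + P) (fun row => (List.range C).foldl
               (fun row k => modAt [] row (j + P) (fun px => px.set k (v i j k))) row)) out := by
        apply foldl_congr_len out.length
        · rfl
        · intro x j hx hj
          exact foldl_modAt_const_idx [] (i+P)
            (fun k row => modAt [] row (j + P) (fun px => px.set k (v i j k)))
            (List.range C) x (by omega)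
        · intro x j hx; rw [length_modAt]; exact hx
      rw [e0]
      exact foldl_modAt_const_idx [] (i+P)
        (fun j row => (List.range C).foldl
          (fun row k => modAt [] row (j + P) (fun px => px.set k (v i j k))) row)
        (List.range W) out hiP
    · intro x j hx; rw [length_modAt]; exact hx
  rw [step1, foldl_modAt_shift [] P G h _ (by rw [List.length_replicate]; omega)]
  rw [List.take_replicate, List.drop_replicate]
  have hminP : min P (h + 2*P) = P := by omega
  have hsubP : h + 2*P - (h + P) = P := by omega
  rw [hminP, hsubP]
  congr 1
  congr 1
  have rowEval : ∀ i ∈ List.range h, G i ((List.replicate (h + 2*P) zrow).getD (i + P) [])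
      = List.replicate P zpix ++ ((img.getD i []).take W).map (fun px => px.take C)
          ++ List.replicate P zpix := by
    intro i hi
    have hih : i < h := List.mem_range.mp hi
    have hr : img.getD i [] ∈ img := by
      rw [List.getD, List.getElem?_eq_getElem hih]
      exact List.getElem_mem hih
    rw [getD_replicate' _ _ _ _ (by omega)]
    have e1 : G i zrow = (List.range W).foldl
        (fun row j => modAt [] row (j + P)
          (fun px => (List.range C).foldl (fun px k => px.set k (v i j k)) px)) zrow := by
      rw [hG]
      apply foldl_congr_len (W + 2*P)
      · simp [hzrow]
      · intro x j hx hj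
        exact foldl_modAt_const_idx [] (j+P) (fun k px => px.set k (v i j k))
          (List.range C) x (by rw [hx]; have := List.mem_range.mp hj; omega)
      · intro x j hx; rw [length_modAt]; exact hx
    rw [e1, foldl_modAt_shift [] P _ W zrow (by rw [hzrow, List.length_replicate]; omega)]
    rw [hzrow, List.take_replicate, List.drop_replicate]
    have hminP2 : min P (W + 2*P) = P := by omega
    have hsubP2 : W + 2*P - (W + P) = P := by omega
    rw [hminP2, hsubP2]
    congr 1
    congr 1
    have pixEval : ∀ j ∈ List.range W,
        (List.range C).foldl (fun px k => px.set k (v i j k))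
            ((List.replicate (W + 2*P) zpix).getD (j + P) [])
          = ((img.getD i []).getD j []).take C := by
      intro j hj
      have hjW : j < W := List.mem_range.mp hj
      rw [getD_replicate' _ _ _ _ (by omega)]
      have e2 : (List.range C).foldl (fun px k => px.set k (v i j k)) zpix
          = (List.range C).foldl (fun px k => modAt (0:Int) px (k + 0) (fun _ => v i j k)) zpix := rfl
      rw [e2, foldl_modAt_shift (0:Int) 0 (fun k _ => v i j k) C zpix (by rw [hzpix, List.length_replicate]; omega)]
      rw [hzpix, List.take_replicate, List.drop_replicate]
      simp only [Nat.add_zero, List.replicate_zero, Nat.sub_self, List.append_nil]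
      have hpx : (img.getD i []).getD j [] ∈ (img.getD i []).take W := by
        have hjlen : j < (img.getD i []).length := lt_of_lt_of_le hjW (hW _ hr)
        have hjt : j < ((img.getD i []).take W).length := by
          rw [List.length_take]; omega
        have e3 : ((img.getD i []).take W)[j] = (img.getD i [])[j] := List.getElem_take
        have e4 : (img.getD i []).getD j [] = (img.getD i [])[j] :=
          List.getD_eq_getElem _ _ hjlen
        rw [e4, ← e3]
        exact List.getElem_mem hjt
      exact map_range_getD _ C 0 (hC _ hr _ hpx)
    calc (List.range W).map (fun j =>
          (List.range C).foldl (fun px k => px.set k (v i j k))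
            ((List.replicate (W + 2*P) zpix).getD (j + P) []))
        = (List.range W).map (fun j => ((img.getD i []).getD j []).take C) :=
          List.map_congr_left pixEval
      _ = ((img.getD i []).take W).map (fun px => px.take C) := by
          rw [show (fun j => ((img.getD i []).getD j []).take C)
              = (fun px : List Int => px.take C) ∘ (fun j => (img.getD i []).getD j []) from rfl,
            ← List.map_map, map_range_getD _ W [] (hW _ hr)]
  calc (List.range h).map (fun i => G i ((List.replicate (h + 2*P) zrow).getD (i + P) []))
      = (List.range h).map (fun i => List.replicate P zpix
          ++ ((img.getD i []).take W).map (fun px => px.take C) ++ List.replicate P zpix) :=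
        List.map_congr_left rowEval
    _ = img.map (fun r => List.replicate P zpix ++ (r.take W).map (fun px => px.take C)
          ++ List.replicate P zpix) := by
        rw [show (fun i => List.replicate P zpix
              ++ ((img.getD i []).take W).map (fun px => px.take C) ++ List.replicate P zpix)
            = (fun r : List (List Int) => List.replicate P zpix
              ++ (r.take W).map (fun px => px.take C) ++ List.replicate P zpix)
              ∘ (fun i => img.getD i []) from rfl,
          ← List.map_map, map_range_getD _ h [] (le_refl _), hh, List.take_length]

theorem map_const_pyRange {α : Type} (n : ℕ) (x : α) :
    (PySem.List.pyRange 0 (n : Int) 1).map (fun _ => x) = List.replicate n x := by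
  rw [List.map_const']
  simp [PySem.List.length_pyRange_one]

theorem pyRange_natCast_eq (n : ℕ) : (PySem.List.pyRange 0 (n:Int) 1) = List.map (fun k : ℕ => (k : Int)) (List.range n) := by
  rw [PySem.List.pyRange_one]; simp only [zero_add, Int.sub_zero, Int.toNat_natCast]

-- splitting an output axis of length h + 2P into P border cells, h content cells, P border cells
theorem map_range_split {α : Type} (P h : ℕ) (f : ℕ → α) (z : α) :
    (List.range (h + 2*P)).map (fun oi => if P ≤ oi ∧ oi < h + P then f (oi - P) else z)
      = List.replicate P z ++ ((List.range h).map f ++ List.replicate P z) := by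
  have e : h + 2*P = P + (h + P) := by ring
  rw [e, List.range_add, List.map_append, List.map_map]
  congr 1
  · calc (List.range P).map (fun oi => if P ≤ oi ∧ oi < h + P then f (oi - P) else z)
        = (List.range P).map (fun _ => z) := List.map_congr_left (by
          intro oi hoi
          have := List.mem_range.mp hoi
          rw [if_neg]; omega)
      _ = List.replicate P z := by rw [List.map_const']; simp
  · rw [List.range_add, List.map_append, List.map_map]
    congr 1
    · apply List.map_congr_left
      intro t ht
      have htl := List.mem_range.mp ht
      simp only [Function.comp_apply]
      rw [if_pos ⟨by omega, by omega⟩]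
      congr 1
      omega
    · calc (List.range P).map
            ((fun oi => if P ≤ oi ∧ oi < h + P then f (oi - P) else z) ∘ ((fun x => P + x) ∘ (fun x => h + x)))
          = (List.range P).map (fun _ => z) := List.map_congr_left (by
            intro t _
            simp only [Function.comp_apply]
            rw [if_neg]; omega)
        _ = List.replicate P z := by rw [List.map_const']; simp

-- B's coordinate map, in the ℕ world, equals the padded-grid value
theorem natWorldB (img : List (List (List Int))) (P W C : ℕ)
    (hW : ∀ r ∈ img, W ≤ r.length)
    (hC : ∀ r ∈ img, ∀ px ∈ r.take W, C ≤ px.length) :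
    (List.range (img.length + 2*P)).map (fun oi =>
      (List.range (W + 2*P)).map (fun oj =>
        if P ≤ oi ∧ oi < img.length + P ∧ P ≤ oj ∧ oj < W + P then
          (List.range C).map (fun k => ((img.getD (oi - P) []).getD (oj - P) []).getD k 0)
        else List.replicate C (0:Int)))
    = List.replicate P (List.replicate (W + 2*P) (List.replicate C (0:Int)))
      ++ img.map (fun r => List.replicate P (List.replicate C (0:Int))
            ++ (r.take W).map (fun px => px.take C)
            ++ List.replicate P (List.replicate C (0:Int)))
      ++ List.replicate P (List.replicate (W + 2*P) (List.replicate C (0:Int))) := by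
  set zpix := List.replicate C (0:Int) with hzpix
  set h := img.length with hh
  set f : ℕ → List (List Int) := fun i =>
    (List.range (W + 2*P)).map (fun oj =>
      if P ≤ oj ∧ oj < W + P then
        (List.range C).map (fun k => ((img.getD i []).getD (oj - P) []).getD k 0)
      else zpix) with hf
  have hinner : ∀ oi, ((List.range (W + 2*P)).map (fun oj =>
        if P ≤ oi ∧ oi < h + P ∧ P ≤ oj ∧ oj < W + P then
          (List.range C).map (fun k => ((img.getD (oi - P) []).getD (oj - P) []).getD k 0)
        else zpix))
      = if P ≤ oi ∧ oi < h + P then f (oi - P) else List.replicate (W + 2*P) zpix := by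
    intro oi
    by_cases h1 : P ≤ oi ∧ oi < h + P
    · rw [if_pos h1, hf]
      apply List.map_congr_left
      intro oj _
      by_cases h2 : P ≤ oj ∧ oj < W + P
      · rw [if_pos ⟨h1.1, h1.2, h2.1, h2.2⟩, if_pos h2]
      · rw [if_neg (by tauto), if_neg h2]
    · rw [if_neg h1]
      calc (List.range (W + 2*P)).map (fun oj =>
            if P ≤ oi ∧ oi < h + P ∧ P ≤ oj ∧ oj < W + P then
              (List.range C).map (fun k => ((img.getD (oi - P) []).getD (oj - P) []).getD k 0)
            else zpix)
          = (List.range (W + 2*P)).map (fun _ => zpix) :=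
            List.map_congr_left (fun oj _ => if_neg (by tauto))
        _ = List.replicate (W + 2*P) zpix := by rw [List.map_const']; simp
  rw [List.map_congr_left (fun oi _ => hinner oi), map_range_split]
  rw [← List.append_assoc]
  congr 1
  congr 1
  have rowEval : ∀ i ∈ List.range h,
      f i = List.replicate P zpix ++ ((img.getD i []).take W).map (fun px => px.take C)
              ++ List.replicate P zpix := by
    intro i hi
    have hih : i < h := List.mem_range.mp hi
    have hr : img.getD i [] ∈ img := by
      rw [List.getD, List.getElem?_eq_getElem hih]
      exact List.getElem_mem hih
    simp only [hf]
    rw [map_range_split P W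
        (fun j => (List.range C).map (fun k => ((img.getD i []).getD j []).getD k 0))
        zpix, ← List.append_assoc]
    congr 1
    congr 1
    have pixEval : ∀ j ∈ List.range W,
        (List.range C).map (fun k => ((img.getD i []).getD j []).getD k 0)
          = ((img.getD i []).getD j []).take C := by
      intro j hj
      have hjW : j < W := List.mem_range.mp hj
      have hpx : (img.getD i []).getD j [] ∈ (img.getD i []).take W := by
        have hjlen : j < (img.getD i []).length := lt_of_lt_of_le hjW (hW _ hr)
        have hjt : j < ((img.getD i []).take W).length := by
          rw [List.length_take]; omega
        have e3 : ((img.getD i []).take W)[j] = (img.getD i [])[j] := List.getElem_take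
        have e4 : (img.getD i []).getD j [] = (img.getD i [])[j] :=
          List.getD_eq_getElem _ _ hjlen
        rw [e4, ← e3]
        exact List.getElem_mem hjt
      exact map_range_getD _ C 0 (hC _ hr _ hpx)
    calc (List.range W).map (fun j =>
          (List.range C).map (fun k => ((img.getD i []).getD j []).getD k 0))
        = (List.range W).map (fun j => ((img.getD i []).getD j []).take C) :=
          List.map_congr_left pixEval
      _ = ((img.getD i []).take W).map (fun px => px.take C) := by
          rw [show (fun j => ((img.getD i []).getD j []).take C)
              = (fun px : List Int => px.take C) ∘ (fun j => (img.getD i []).getD j []) from rfl,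
            ← List.map_map, map_range_getD _ W [] (hW _ hr)]
  calc (List.range h).map f
      = (List.range h).map (fun i => List.replicate P zpix
          ++ ((img.getD i []).take W).map (fun px => px.take C) ++ List.replicate P zpix) :=
        List.map_congr_left rowEval
    _ = img.map (fun r => List.replicate P zpix ++ (r.take W).map (fun px => px.take C)
          ++ List.replicate P zpix) := by
        rw [show (fun i => List.replicate P zpix
              ++ ((img.getD i []).take W).map (fun px => px.take C) ++ List.replicate P zpix)
            = (fun r : List (List Int) => List.replicate P zpix
              ++ (r.take W).map (fun px => px.take C) ++ List.replicate P zpix)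
              ∘ (fun i => img.getD i []) from rfl,
          ← List.map_map, map_range_getD _ h [] (le_refl _), hh, List.take_length]

-- when the channel count is 0, A's loops never write and both sides are the empty-pixel grid
theorem zero_c_eq (img : List (List (List Int))) (padding : Int)
    (hc : (PySem.List.pyGetD (PySem.List.pyGetD img 0 []) 0 []).length = 0) :
    pad_colored img padding = pad_colored_alt img padding := by
  have h0 : PySem.List.pyRange 0 (0:Int) 1 = ([] : List Int) := by decide
  simp only [pad_colored, pad_colored_alt, hc, Nat.cast_zero, ite_self, h0,
    List.foldl_nil, List.map_nil, foldl_keep]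

-- the non-degenerate case: padding ≥ 0 and A's shape requirements hold
theorem core_eq (img : List (List (List Int))) (padding : Int)
    (hp : 0 ≤ padding)
    (hsh : ∀ r ∈ img, (PySem.List.pyGetD img 0 []).length ≤ r.length ∧
      ∀ px ∈ r.take (PySem.List.pyGetD img 0 []).length,
        (PySem.List.pyGetD (PySem.List.pyGetD img 0 []) 0 []).length ≤ px.length) :
    pad_colored img padding = pad_colored_alt img padding := by
  cases img with
  | nil => exact zero_c_eq [] padding (by decide)
  | cons r0 rest =>
      obtain ⟨P, rfl⟩ : ∃ P : ℕ, padding = (P : Int) := ⟨padding.toNat, (Int.toNat_of_nonneg hp).symm⟩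
      simp only [pad_colored, pad_colored_alt, PySem.List.pyGetD_zero_cons]
      have hh : ((r0 :: rest).length : Int) ≠ 0 := by
        simp only [List.length_cons]; push_cast; omega
      rw [if_pos hh]
      set W := r0.length with hWdef
      set C := (PySem.List.pyGetD r0 0 []).length with hCdef
      have hc : (if (↑(r0 :: rest).length : Int) ≠ 0 ∧ (↑W : Int) ≠ 0 then (↑C : Int) else 0) = ↑C := by
        by_cases hW0 : W = 0
        · have hr0 : r0 = [] := List.length_eq_zero_iff.mp hW0
          rw [if_neg (by intro hand; exact hand.2 (by simp [hW0]))]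
          simp [hCdef, hr0]
        · rw [if_pos ⟨hh, by simpa using hW0⟩]
      rw [hc]
      have cast1 : ((W : Int) + 2 * ↑P) = ((W + 2*P : ℕ) : Int) := by push_cast; ring
      have cast2 : (((r0 :: rest).length : Int) + 2 * ↑P) = (((r0 :: rest).length + 2*P : ℕ) : Int) := by
        push_cast; ring
      rw [cast1, cast2]
      simp only [map_const_pyRange]
      simp only [pyRange_natCast_eq]
      simp only [List.foldl_map, List.map_map]
      simp only [← Nat.cast_add]
      simp only [PySem.List.pySetD_natCast, PySem.List.pyGetD_natCast]
      have hpre2 := hsh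
      simp only [PySem.List.pyGetD_zero_cons] at hpre2
      have hWpre : ∀ r ∈ (r0 :: rest), W ≤ r.length := fun r hr => (hpre2 r hr).1
      have hCpre : ∀ r ∈ (r0 :: rest), ∀ px ∈ r.take W, C ≤ px.length :=
        fun r hr px hpx => (hpre2 r hr).2 px hpx
      have hA := natWorld (r0 :: rest) P W C hWpre hCpre
      have hB := natWorldB (r0 :: rest) P W C hWpre hCpre
      refine hA.trans ?_
      rw [← hB]
      apply List.map_congr_left
      intro oi _
      simp only [Function.comp_apply]
      apply List.map_congr_left
      intro oj _
      simp only [Function.comp_apply]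
      by_cases hcnd : P ≤ oi ∧ oi < (r0 :: rest).length + P ∧ P ≤ oj ∧ oj < W + P
      · rw [if_pos hcnd]
        rw [if_pos (show (0:Int) ≤ ↑oi - ↑P ∧ (↑oi:Int) - ↑P < ↑(r0 :: rest).length ∧
            (0:Int) ≤ ↑oj - ↑P ∧ (↑oj:Int) - ↑P < ↑W from
          ⟨by omega, by omega, by omega, by omega⟩)]
        rw [show ((oi:Int) - (P:Int)) = ((oi - P : ℕ) : Int) from by omega,
          show ((oj:Int) - (P:Int)) = ((oj - P : ℕ) : Int) from by omega]
        simp only [Function.comp_def, PySem.List.pyGetD_natCast]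
      · rw [if_neg hcnd, if_neg (show ¬((0:Int) ≤ ↑oi - ↑P ∧ (↑oi:Int) - ↑P < ↑(r0 :: rest).length ∧
            (0:Int) ≤ ↑oj - ↑P ∧ (↑oj:Int) - ↑P < ↑W) from by
          intro hint
          exact hcnd ⟨by omega, by omega, by omega, by omega⟩)]

-- ===== VERDICT (by name: the statement is the Claim_ definition above) =====
theorem pad_colored_spec : Claim_equal_pad_colored := by
  intro img padding _ hPre
  unfold Spec_pad_colored
  unfold Pre_pad_colored at hPre
  rcases hPre with hC0 | ⟨hp, hsh⟩
  · exact zero_c_eq img padding hC0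
  · exact core_eq img padding hp hsh
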